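-- pv_equiv track=rewrite | github.com/JesseDesjardins/SearchEngine | SpellingCorrector.py | reductions
-- ===== SOURCE A (Python) =====
-- from itertools import product
--
-- def number_of_duplicates(string, idx):
--     # return number of duplicates
--     initial_idx = idx
--     last = string[idx]
--     while idx + 1 < len(string) and string[idx + 1] == last:
--         idx += 1
--     return idx - initial_idx
--
-- def reductions(word):
--     # remove duplicate letters
--     word = list(word)
--     # ['h','i', 'i', 'i'] becomes ['h', ['i', 'ii', 'iii']]
--     for idx, l in enumerate(word):
--         n = number_of_duplicates(word, idx)
--         # if letter appears more than once in a row
--         if n: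
--             # generate a flat list of options ('hhh' becomes ['h','hh','hhh'])
--             flat_dupes = [l * (r + 1) for r in range(n + 1)][
--                          :3]  # only take up to 3, there are no 4 letter repetitions in english
--             # remove duplicate letters in original word
--             for _ in range(n):
--                 word.pop(idx + 1)
--             # replace original letter with flat list
--             word[idx] = flat_dupes
--
--     # ['h',['i','ii','iii']] becomes 'hi','hii','hiii'
--     for p in product(*word):
--         yield ''.join(p)
-- ===== SOURCE B (Python) =====
-- from itertools import product, groupby
--
-- def reductions(word):
--     # For each run of a repeated letter, offer 1..min(run,3) copies, then
--     # yield every combination (one pass with groupby; no in-place mutation).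
--     option_lists = [[ch * k for k in range(1, min(len(list(grp)), 3) + 1)]
--                     for ch, grp in groupby(word)]
--     for p in product(*option_lists):
--         yield ''.join(p)
-- ===== Notes on version B (the rewrite author's own statement) =====
-- stated objective: simpler
-- what changed: Replaces A's destructive scan (enumerate over the live list, popping duplicates and splicing option lists in place) with a single non-mutating itertools.groupby pass that builds one option list per letter run and feeds them straight to product.
import Mathlib
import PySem

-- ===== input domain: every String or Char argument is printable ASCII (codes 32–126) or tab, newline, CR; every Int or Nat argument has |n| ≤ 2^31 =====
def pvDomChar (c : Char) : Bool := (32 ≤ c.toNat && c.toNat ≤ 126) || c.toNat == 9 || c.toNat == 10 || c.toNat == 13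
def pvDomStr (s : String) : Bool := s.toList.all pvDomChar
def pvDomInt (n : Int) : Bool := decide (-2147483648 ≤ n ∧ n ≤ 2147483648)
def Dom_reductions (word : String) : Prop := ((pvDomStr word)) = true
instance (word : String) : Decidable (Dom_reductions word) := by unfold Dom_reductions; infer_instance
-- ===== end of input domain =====

-- B replaces A's destructive enumerate-with-pop scan by a single groupby pass
-- over the word (objective: simpler); same return values, no mutation.

-- shared port of `itertools.product(*lists)` followed by ''.join (both Pythons
-- end with exactly this library call): left-to-right product, first list slowest
def pyProductJoin (ls : List (List String)) : List String :=
  ls.foldl (fun acc opts => acc.flatMap (fun s => opts.map (fun o => s ++ o))) [""]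

-- ===== PORT A =====
-- an element of A's mutated `word` list: still a single letter, or an already
-- substituted flat list of option strings
inductive AElem where
  | ch : Char → AElem
  | opts : List String → AElem
deriving DecidableEq, Repr, Inhabited

-- `l * (r + 1)` for the letter `l` at the scanned index (A only reaches this
-- with a single-character element, see invariant in the proofs below)
def aMul (e : AElem) (k : Nat) : String :=
  match e with
  | .ch c => String.mk (List.replicate k c)
  | .opts _ => ""   -- unreachable: A never multiplies a substituted list

-- port of number_of_duplicates' while loop: idx advances while the next
-- element equals `last`; result is final idx
def numdupAux (word : List AElem) (last : AElem) (idx : Nat) : Nat :=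
  if _h : idx + 1 < word.length ∧ word[idx + 1]! = last then
    numdupAux word last (idx + 1)
  else idx
termination_by word.length - idx

def number_of_duplicates (word : List AElem) (idx : Nat) : Nat :=
  numdupAux word (word[idx]!) idx - idx

-- the `for idx, l in enumerate(word)` loop: Python's enumerate over the live,
-- mutating list = advance idx by 1 each step while idx < current length
def aLoop (word : List AElem) (idx : Nat) : List AElem :=
  if h : idx < word.length then
    let l := word[idx]!
    let n := number_of_duplicates word idx
    if n ≠ 0 then
      let flat_dupes := (((List.range (n + 1)).map (fun r => aMul l (r + 1))).take 3)
      -- n pops at idx+1, then word[idx] := flat_dupes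
      aLoop (word.take idx ++ [AElem.opts flat_dupes] ++ word.drop (idx + 1 + n)) (idx + 1)
    else aLoop word (idx + 1)
  else word
termination_by word.length - idx
decreasing_by
  · simp only [List.length_append, List.length_take, List.length_drop,
      List.length_singleton]
    omega
  · omega

def aElemOptions (e : AElem) : List String :=
  match e with
  | .ch c => [String.mk [c]]
  | .opts l => l

def reductions (word : String) : List String :=
  pyProductJoin ((aLoop (word.toList.map AElem.ch) 0).map aElemOptions)

-- ===== PORT B =====
-- port of itertools.groupby: list of (letter, run length)
def groupRuns : List Char → List (Char × Nat)
  | [] => []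
  | c :: cs =>
      (c, (cs.takeWhile (fun d => d == c)).length + 1) ::
        groupRuns (cs.dropWhile (fun d => d == c))
termination_by l => l.length
decreasing_by
  simpa [Nat.lt_succ_iff] using List.length_dropWhile_le (fun d => d == c) cs

-- `[ch * k for k in range(1, min(g, 3) + 1)]`
def runOptions (c : Char) (g : Nat) : List String :=
  (PySem.List.pyRange 1 (min g 3 + 1) 1).map
    (fun k => String.mk (List.replicate k.toNat c))

def reductions_alt (word : String) : List String :=
  pyProductJoin ((groupRuns word.toList).map (fun p => runOptions p.1 p.2))

-- ===== PRECONDITION & SPEC =====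
def Spec_reductions (word : String) (out : List String) : Prop := out = reductions_alt word
instance (word : String) (out : List String) : Decidable (Spec_reductions word out) := by unfold Spec_reductions; infer_instance

-- ===== CLAIM (what is proved, stated in full; the proofs are below) =====
def Claim_equal_reductions : Prop := ∀ (word : String), Dom_reductions word → Spec_reductions word (reductions word)

-- ===== LEMMAS AND PROOFS =====

-- the option list A leaves at the start of a run of k+1 equal letters (k ≥ 1)
def optsOf (c : Char) (k : Nat) : List String :=
  ((List.range (k + 1)).map (fun r => String.mk (List.replicate (r + 1) c))).take 3

-- what A's in-place scan turns the character list into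
def collapse : List Char → List AElem
  | [] => []
  | c :: cs =>
      let k := (cs.takeWhile (fun d => d == c)).length
      if k = 0 then AElem.ch c :: collapse cs
      else AElem.opts (optsOf c k) :: collapse (cs.drop k)
termination_by l => l.length
decreasing_by
  · simp
  · simpa [Nat.lt_succ_iff] using Nat.sub_le cs.length _

theorem dropWhile_eq_drop {α : Type} (p : α → Bool) (l : List α) :
    l.dropWhile p = l.drop (l.takeWhile p).length := by
  induction l with
  | nil => simp
  | cons a l ih => by_cases h : p a <;> simp [List.dropWhile, List.takeWhile, h, ih]

theorem numdupAux_spec (word : List AElem) (last : AElem) (idx : Nat) :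
    numdupAux word last idx
      = idx + ((word.drop (idx + 1)).takeWhile (fun e => e == last)).length := by
  rw [numdupAux]
  split
  · rename_i h
    rw [numdupAux_spec word last (idx + 1), List.drop_eq_getElem_cons h.1]
    have hg : word[idx + 1] = last := by
      have := h.2; rwa [getElem!_pos word (idx + 1) h.1] at this
    simp [List.takeWhile_cons, hg]
    omega
  · rename_i h
    by_cases h1 : idx + 1 < word.length
    · have h2 : ¬ word[idx + 1]! = last := fun hc => h ⟨h1, hc⟩
      rw [getElem!_pos word (idx + 1) h1] at h2
      rw [List.drop_eq_getElem_cons h1]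
      simp [List.takeWhile_cons, h2]
    · rw [List.drop_eq_nil_of_le (by omega)]
      simp
termination_by word.length - idx

theorem aLoop_collapse (cs : List Char) (done : List AElem) :
    aLoop (done ++ cs.map AElem.ch) done.length = done ++ collapse cs := by
  match cs with
  | [] =>
    rw [aLoop, collapse]
    simp
  | c :: cs =>
    have hlen : done.length < (done ++ (c :: cs).map AElem.ch).length := by simp
    have hget : (done ++ (c :: cs).map AElem.ch)[done.length]! = AElem.ch c := by
      rw [getElem!_pos (done ++ (c :: cs).map AElem.ch) done.length hlen, List.getElem_append_right (Nat.le_refl _)]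
      simp
    have hdrop : (done ++ (c :: cs).map AElem.ch).drop (done.length + 1) = cs.map AElem.ch := by
      rw [List.drop_length_add_append]
      simp
    have hnum : number_of_duplicates (done ++ (c :: cs).map AElem.ch) done.length
        = (cs.takeWhile (fun d => d == c)).length := by
      rw [number_of_duplicates, numdupAux_spec, hget, hdrop, List.takeWhile_map]
      have hp : (fun x => AElem.ch x == AElem.ch c) = (fun d => d == c) := by
        funext d; by_cases h : d = c <;> simp [h]
      simp [Function.comp_def, hp]
    rw [aLoop, dif_pos hlen, hnum, hget]
    by_cases hk : (cs.takeWhile (fun d => d == c)).length = 0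
    · rw [if_neg (by simpa using hk), collapse]
      simp only [hk, if_pos rfl]
      have := aLoop_collapse cs (done ++ [AElem.ch c])
      simpa using this
    · rw [if_pos (by simpa using hk), collapse]
      simp only [if_neg hk]
      have hd : (done ++ (c :: cs).map AElem.ch).drop
          (done.length + 1 + (cs.takeWhile (fun d => d == c)).length)
          = (cs.drop (cs.takeWhile (fun d => d == c)).length).map AElem.ch := by
        have : done.length + 1 + (cs.takeWhile (fun d => d == c)).length
            = done.length + (1 + (cs.takeWhile (fun d => d == c)).length) := by omega
        rw [this, List.drop_length_add_append]
        simp [Nat.add_comm 1 _, ← List.map_drop]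
      rw [List.take_left, hd]
      have hmul : ((List.range ((cs.takeWhile (fun d => d == c)).length + 1)).map
            (fun r => aMul (AElem.ch c) (r + 1))).take 3
          = optsOf c (cs.takeWhile (fun d => d == c)).length := by
        simp [optsOf, aMul]
      rw [hmul]
      have := aLoop_collapse (cs.drop (cs.takeWhile (fun d => d == c)).length)
        (done ++ [AElem.opts (optsOf c (cs.takeWhile (fun d => d == c)).length)])
      simpa using this
termination_by cs.length
decreasing_by
  · simp
  · simpa [Nat.lt_succ_iff] using Nat.sub_le cs.length _

theorem head_options_one (c : Char) :
    aElemOptions (AElem.ch c) = runOptions c 1 := by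
  have h : PySem.List.pyRange 1 2 1 = [1] := by decide
  simp [aElemOptions, runOptions, h]

theorem head_options_run (c : Char) (k : Nat) (hk : k ≠ 0) :
    optsOf c k = runOptions c (k + 1) := by
  rcases Nat.lt_or_ge k 2 with h2 | h2
  · interval_cases k
    · exact absurd rfl hk
    · have h : PySem.List.pyRange 1 3 1 = [1, 2] := by decide
      simp [optsOf, runOptions, h, List.range_succ]
  · have hmin : min (k + 1) 3 = 3 := by omega
    have h : PySem.List.pyRange 1 4 1 = [1, 2, 3] := by decide
    have ht : (List.range (k + 1)).take 3 = List.range 3 := by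
      rw [List.take_range]; congr 1; omega
    rw [optsOf, ← List.map_take, ht]
    simp [runOptions, hmin, h, List.range_succ]

theorem collapse_groupRuns (cs : List Char) :
    (collapse cs).map aElemOptions
      = (groupRuns cs).map (fun p => runOptions p.1 p.2) := by
  match cs with
  | [] => rw [collapse, groupRuns]; simp
  | c :: cs =>
    rw [collapse, groupRuns]
    by_cases hk : (cs.takeWhile (fun d => d == c)).length = 0
    · have hdw : cs.dropWhile (fun d => d == c) = cs := by
        rw [dropWhile_eq_drop, hk, List.drop_zero]
      simp only [hk, reduceIte, List.map_cons, hdw, Nat.zero_add]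
      rw [collapse_groupRuns cs, head_options_one]
    · simp only [if_neg hk, List.map_cons]
      rw [dropWhile_eq_drop, collapse_groupRuns (cs.drop (cs.takeWhile (fun d => d == c)).length)]
      simp only [aElemOptions]
      rw [head_options_run c _ hk]
termination_by cs.length
decreasing_by
  · simp
  · simpa [Nat.lt_succ_iff] using Nat.sub_le cs.length _

-- ===== VERDICT (by name: the statement is the Claim_ definition above) =====
theorem reductions_spec : Claim_equal_reductions := by
  intro word _
  unfold Spec_reductions reductions reductions_alt
  have h := aLoop_collapse word.toList []
  simp only [List.nil_append, List.length_nil] at h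
  rw [h, collapse_groupRuns]
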